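-- pv_equiv track=rewrite | github.com/ptrenchs/TFM_DIC | mu_DIC/main.py | informacion_ruta
-- ===== SOURCE A (Python) =====
-- def informacion_ruta(ruta):
--     while True:
--         ruta = ruta.replace('//','/')
--         if '//' not in ruta:
--             break
--     if ruta[-1] == '/':
--         ruta = ruta[:-1]
--     ruta_split = ruta.split('/')
--     nombre = ruta_split[-1]
--     nombre_split = nombre.split('.')
--     if 1 < len(nombre_split):
--         nombre = '.'.join(nombre_split[:-1])
--         extension = nombre_split[-1]
--     else:
--         extension = ''
--
--     if len(ruta_split) == 1:
--         carpeta =''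
--     else:
--         carpeta = '/'.join(ruta_split[:-1])
--
--     return carpeta,nombre,extension.lower()
-- ===== SOURCE B (Python) =====
-- def informacion_ruta(ruta):
--     # one left-to-right pass collapses runs of '/' (instead of replace-until-fixpoint)
--     out = []
--     prev = None
--     for ch in ruta:
--         if ch != '/' or prev != '/':
--             out.append(ch)
--         prev = ch
--     if out and out[-1] == '/':
--         out.pop()
--     s = ''.join(out)
--     # one right scan each instead of split/join round-trips
--     carpeta, _, nombre = s.rpartition('/')
--     head, sep, tail = nombre.rpartition('.')
--     extension = ''
--     if sep:
--         nombre, extension = head, tail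
--     return carpeta, nombre, extension.lower()
-- ===== Notes on version B (the rewrite author's own statement) =====
-- stated objective: simpler
-- what changed: Replaces A's replace-until-fixpoint loop that collapses repeated slashes and its split/join list round-trips by a single accumulating pass over the characters plus one right-scan rpartition for the folder and one for the extension.
-- crash fix: A raises IndexError on the empty string (its last-character read); B returns ('', '', '') there. — e.g. on informacion_ruta(""): A raises IndexError, B returns ("", "", "")
import Mathlib
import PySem

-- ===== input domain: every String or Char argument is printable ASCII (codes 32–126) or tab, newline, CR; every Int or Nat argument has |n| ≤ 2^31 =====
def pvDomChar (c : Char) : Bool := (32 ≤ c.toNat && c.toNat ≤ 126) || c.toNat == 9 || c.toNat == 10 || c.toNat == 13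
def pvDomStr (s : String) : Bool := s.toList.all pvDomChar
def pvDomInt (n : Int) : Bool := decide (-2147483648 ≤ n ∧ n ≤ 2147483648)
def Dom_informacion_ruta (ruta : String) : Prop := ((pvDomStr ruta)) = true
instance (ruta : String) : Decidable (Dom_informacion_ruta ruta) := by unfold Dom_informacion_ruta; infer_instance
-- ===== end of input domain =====

-- B replaces A's replace-until-fixpoint slash collapse and split/join list surgery by one
-- accumulating pass plus two right-partitions (objective: simpler); return value only, no mutation.

-- ===== PORT A =====
-- repSl characterises one Python str.replace('//','/') pass; collapseA's termination proof needs
-- the three lemmas below, which is why they sit above the port (cited in decreasing_by).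
def repSl : List Char → List Char
  | [] => []
  | [c] => [c]
  | c :: d :: t => if c = '/' ∧ d = '/' then '/' :: repSl t else c :: repSl (d :: t)
termination_by l => l.length

theorem replace_go_eq (l acc : List Char) (fuel : Nat) (h : l.length ≤ fuel) :
    PySem.Chars.replace.go ['/', '/'] ['/'] fuel l acc = acc.reverse ++ repSl l := by
  induction fuel generalizing l acc with
  | zero =>
    have hl : l = [] := List.eq_nil_of_length_eq_zero (Nat.le_zero.mp h)
    subst hl; simp [PySem.Chars.replace.go, repSl]
  | succ n ih =>
    match l with
    | [] => simp [PySem.Chars.replace.go, repSl]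
    | [c] =>
      rw [PySem.Chars.replace.go]
      have hnp : ¬ (['/', '/'].isPrefixOf [c] = true) := by simp [List.isPrefixOf]
      simp only [hnp]
      rw [ih [] (c :: acc) (by simp)]
      simp [repSl]
    | c :: d :: t =>
      rw [PySem.Chars.replace.go]
      by_cases hp : c = '/' ∧ d = '/'
      · have : ['/', '/'].isPrefixOf (c :: d :: t) = true := by
          simp [List.isPrefixOf, hp.1, hp.2]
        simp only [this, if_true]
        rw [show (c :: d :: t).drop ['/', '/'].length = t by simp]
        rw [ih t _ (by simp at h ⊢; omega)]
        simp [repSl, hp]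
      · have : ¬ (['/', '/'].isPrefixOf (c :: d :: t) = true) := by
          simp [List.isPrefixOf]; tauto
        simp only [this]
        rw [ih (d :: t) (c :: acc) (by simp at h ⊢; omega)]
        simp [repSl, hp]

theorem replace_eq_repSl (cs : List Char) :
    PySem.Chars.replace cs ['/', '/'] ['/'] = repSl cs := by
  rw [PySem.Chars.replace]
  simp [replace_go_eq cs [] cs.length le_rfl]

theorem repSl_length_le (cs : List Char) : (repSl cs).length ≤ cs.length := by
  fun_induction repSl cs with
  | case1 => simp
  | case2 c => simp
  | case3 c d t hp ih => simp at ih ⊢; omega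
  | case4 c d t hp ih => simp at ih ⊢; omega

theorem repSl_eq_self (cs : List Char) (h : ¬ ['/', '/'] <:+: cs) : repSl cs = cs := by
  fun_induction repSl cs with
  | case1 => rfl
  | case2 c => rfl
  | case3 c d t hp ih =>
    exact absurd (List.IsPrefix.isInfix ⟨t, by simp [hp.1, hp.2]⟩) h
  | case4 c d t hp ih =>
    rw [ih (fun hi => h (List.infix_cons hi))]

theorem repSl_length_lt (cs : List Char) (h : ['/', '/'] <:+: cs) :
    (repSl cs).length < cs.length := by
  fun_induction repSl cs with
  | case1 => exact absurd h.length_le (by simp)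
  | case2 c => exact absurd h.length_le (by simp)
  | case3 c d t hp ih =>
    have := repSl_length_le t; simp; omega
  | case4 c d t hp ih =>
    have ht : ['/', '/'] <:+: d :: t := by
      rcases List.infix_cons_iff.mp h with hpre | hi
      · rcases hpre with ⟨r, hr⟩
        simp at hr
        exact absurd ⟨hr.1.symm, hr.2.1.symm⟩ hp
      · exact hi
    have := ih ht; simp at this ⊢; omega

theorem repSl_infix_length_lt (cs : List Char) (h : ['/', '/'] <:+: repSl cs) :
    (repSl cs).length < cs.length := by
  by_cases h2 : ['/', '/'] <:+: cs
  · exact repSl_length_lt cs h2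
  · rw [repSl_eq_self cs h2] at h; exact absurd h h2

-- the 'while True: ruta = ruta.replace('//','/'); if '//' not in ruta: break' loop of A
def collapseA (cs : List Char) : List Char :=
  let cs' := PySem.Chars.replace cs ['/', '/'] ['/']
  if PySem.Chars.isIn ['/', '/'] cs' then collapseA cs' else cs'
termination_by cs.length
decreasing_by
  have hin := (PySem.Chars.isIn_iff_infix _ _).mp (by assumption)
  simp only [cs', replace_eq_repSl] at hin ⊢
  exact repSl_infix_length_lt cs hin

-- literal port of A over the string's character list (Chars = PySem's exact Python string ops);
-- ruta[-1] is read with pyGetD, valid under Pre_ (A raises IndexError on the empty string).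
def informacion_ruta (ruta : String) : String × String × String :=
  let cs := collapseA ruta.toList
  let cs := if PySem.List.pyGetD cs (-1) ' ' = '/' then PySem.List.slice cs none (some (-1)) else cs
  let ruta_split := PySem.Chars.splitOn cs ['/']
  let nombre := PySem.List.pyGetD ruta_split (-1) []
  let nombre_split := PySem.Chars.splitOn nombre ['.']
  let ne : List Char × List Char :=
    if 1 < PySem.List.len nombre_split then
      (PySem.Chars.join ['.'] (PySem.List.slice nombre_split none (some (-1))),
       PySem.List.pyGetD nombre_split (-1) [])
    else (nombre, [])
  let carpeta := if PySem.List.len ruta_split = 1 then ([] : List Char)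
    else PySem.Chars.join ['/'] (PySem.List.slice ruta_split none (some (-1)))
  (String.ofList carpeta, String.ofList ne.1, String.ofList (PySem.Chars.lower ne.2))

-- ===== PORT B =====
-- hand port of Python str.rpartition(sep) for a ONE-character sep (all B uses): scan from the
-- right; exact for len(sep) = 1 (('', '', s) when sep is absent).
def rpartitionChar (cs : List Char) (c : Char) : List Char × List Char × List Char :=
  match (cs.reverse.span (· ≠ c)) with
  | (_, []) => ([], [], cs)
  | (tailRev, _ :: restRev) => (restRev.reverse, [c], tailRev.reverse)

def informacion_ruta_alt (ruta : String) : String × String × String :=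
  let st := ruta.toList.foldl
    (fun (st : List Char × Option Char) ch =>
      if ch ≠ '/' ∨ st.2 ≠ some '/' then (st.1 ++ [ch], some ch) else (st.1, some ch))
    ([], none)
  let out := if st.1 ≠ [] ∧ st.1.getLast? = some '/' then st.1.dropLast else st.1
  let p1 := rpartitionChar out '/'
  let carpeta := p1.1
  let nombre := p1.2.2
  let p2 := rpartitionChar nombre '.'
  let ne : List Char × List Char := if p2.2.1 ≠ [] then (p2.1, p2.2.2) else (nombre, [])
  (String.ofList carpeta, String.ofList ne.1, String.ofList (PySem.Chars.lower ne.2))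

-- ===== PRECONDITION & SPEC =====
-- Pre_ excludes only the empty string, on which A's ruta[-1] raises IndexError.
def Pre_informacion_ruta (ruta : String) : Prop := ruta ≠ ""
instance (ruta : String) : Decidable (Pre_informacion_ruta ruta) := by unfold Pre_informacion_ruta; infer_instance
def pvWitness_informacion_ruta : String := "a//b/c.TXT"

-- A raises IndexError exactly on the empty string; B returns ('', '', '') there.
def Raises_informacion_ruta (ruta : String) : Prop := ruta = ""
instance (ruta : String) : Decidable (Raises_informacion_ruta ruta) := by unfold Raises_informacion_ruta; infer_instance
def pvRaiseWitness_informacion_ruta : String := ""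
def pvRaiseWitnessOut_informacion_ruta : String × String × String := ("", "", "")

def Spec_informacion_ruta (ruta : String) (out : String × String × String) : Prop := out = informacion_ruta_alt ruta
instance (ruta : String) (out : String × String × String) : Decidable (Spec_informacion_ruta ruta out) := by unfold Spec_informacion_ruta; infer_instance

-- ===== CLAIM (what is proved, stated in full; the proofs are below) =====
def Claim_equal_informacion_ruta : Prop := ∀ (ruta : String), Dom_informacion_ruta ruta → Pre_informacion_ruta ruta → Spec_informacion_ruta ruta (informacion_ruta ruta)
def Claim_raises_informacion_ruta : Prop := (∀ (ruta : String), Dom_informacion_ruta ruta → Raises_informacion_ruta ruta → ¬ Pre_informacion_ruta ruta) ∧ (Dom_informacion_ruta (pvRaiseWitness_informacion_ruta) ∧ Raises_informacion_ruta (pvRaiseWitness_informacion_ruta) ∧ informacion_ruta_alt (pvRaiseWitness_informacion_ruta) = pvRaiseWitnessOut_informacion_ruta)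

-- ===== LEMMAS AND PROOFS =====

-- squeeze with explicit previous character: the meaning of B's accumulating pass
def sqO : Option Char → List Char → List Char
  | _, [] => []
  | p, c :: t => if c = '/' ∧ p = some '/' then sqO (some c) t else c :: sqO (some c) t

theorem foldB_eq (cs : List Char) (out : List Char) (p : Option Char) :
    (cs.foldl
      (fun (st : List Char × Option Char) ch =>
        if ch ≠ '/' ∨ st.2 ≠ some '/' then (st.1 ++ [ch], some ch) else (st.1, some ch))
      (out, p)).1 = out ++ sqO p cs := by
  induction cs generalizing out p with
  | nil => simp [sqO]
  | cons c t ih =>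
    simp only [List.foldl_cons]
    by_cases hc : c = '/' ∧ p = some '/'
    · rw [if_neg (by tauto), ih, sqO, if_pos hc]
    · rw [if_pos (by tauto), ih, sqO, if_neg hc, List.append_assoc, List.singleton_append]

theorem sqO_repSl (cs : List Char) (p : Option Char) : sqO p (repSl cs) = sqO p cs := by
  fun_induction repSl cs generalizing p with
  | case1 => rfl
  | case2 c => rfl
  | case3 c d t hp ih =>
    obtain ⟨rfl, rfl⟩ := hp
    simp only [sqO, ih]
    by_cases hps : p = some '/'
    · simp [hps]
    · simp [hps]
  | case4 c d t hp ih =>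
    simp only [sqO, ih]

theorem sqO_eq_self (cs : List Char) (p : Option Char) (h : ¬ ['/', '/'] <:+: cs)
    (hp : p = some '/' → cs.head? ≠ some '/') : sqO p cs = cs := by
  induction cs generalizing p with
  | nil => rfl
  | cons c t ih =>
    have hnc : ¬ (c = '/' ∧ p = some '/') := by
      rintro ⟨rfl, hps⟩; exact hp hps rfl
    have ht : ¬ ['/', '/'] <:+: t := fun hi => h (List.infix_cons hi)
    have hstep : sqO (some c) t = t := by
      apply ih _ ht
      intro hcp hhd
      have hc' : c = '/' := by simpa using hcp
      rcases t with _ | ⟨d, t'⟩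
      · simp at hhd
      · simp at hhd
        exact h (List.IsPrefix.isInfix ⟨t', by simp [hc', hhd]⟩)
    simp only [sqO, if_neg hnc, hstep]

theorem collapseA_eq (cs : List Char) : collapseA cs = sqO none cs := by
  fun_induction collapseA cs with
  | case1 cs cs' hin ih =>
    rw [ih]
    simp only [cs', replace_eq_repSl]
    exact sqO_repSl cs none
  | case2 cs cs' hin =>
    have hni : ¬ ['/', '/'] <:+: cs' := fun hi =>
      hin ((PySem.Chars.isIn_iff_infix _ _).mpr hi)
    have h1 : sqO none cs' = cs' := sqO_eq_self cs' none hni (by simp)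
    calc cs' = sqO none cs' := h1.symm
      _ = sqO none (repSl cs) := by simp only [cs', replace_eq_repSl]
      _ = sqO none cs := sqO_repSl cs none

theorem modifyHead_fun_id {α : Type} (l : List α) : List.modifyHead (fun x => x) l = l := by
  cases l <;> simp

-- recursive characterisation of Python split with a one-character separator
def splitRec (c : Char) : List Char → List (List Char)
  | [] => [[]]
  | d :: t => if d = c then [] :: splitRec c t else (splitRec c t).modifyHead (d :: ·)

theorem splitOn_go_eq (c : Char) (l cur : List Char) (acc : List (List Char)) (fuel : Nat)
    (h : l.length + 1 ≤ fuel) :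
    PySem.Chars.splitOn.go [c] fuel l cur acc
      = acc.reverse ++ (splitRec c l).modifyHead (cur.reverse ++ ·) := by
  induction fuel generalizing l cur acc with
  | zero => omega
  | succ n ih =>
    match l with
    | [] => simp [PySem.Chars.splitOn.go, splitRec]
    | d :: t =>
      rw [PySem.Chars.splitOn.go]
      by_cases hd : d = c
      · have hpre : [c].isPrefixOf (d :: t) = true := by simp [List.isPrefixOf, hd]
        simp only [hpre, if_pos]
        rw [show (d :: t).drop [c].length = t by simp]
        rw [ih t [] _ (by simp at h ⊢; omega)]
        simp [splitRec, hd, modifyHead_fun_id]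
      · have hpre : ¬ ([c].isPrefixOf (d :: t) = true) := by
          simp [List.isPrefixOf]; exact fun h => hd h.symm
        simp only [hpre, Bool.false_eq_true, if_false]
        rw [ih t (d :: cur) acc (by simp at h ⊢; omega)]
        simp only [splitRec, if_neg hd, List.modifyHead_modifyHead]
        congr 2
        funext x
        simp

theorem splitOn_eq (c : Char) (l : List Char) :
    PySem.Chars.splitOn l [c] = splitRec c l := by
  rw [PySem.Chars.splitOn, splitOn_go_eq c l [] [] (l.length + 1) le_rfl]
  simp [modifyHead_fun_id]

theorem splitRec_ne_nil (c : Char) (l : List Char) : splitRec c l ≠ [] := by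
  induction l with
  | nil => simp [splitRec]
  | cons d t ih =>
    by_cases hd : d = c
    · simp [splitRec, hd]
    · simp only [splitRec, if_neg hd]
      intro hc
      exact ih (by simpa using congrArg List.length hc)

theorem join_splitRec (c : Char) (l : List Char) :
    PySem.Chars.join [c] (splitRec c l) = l := by
  induction l with
  | nil => rw [show splitRec c [] = [[]] from rfl, PySem.Chars.join_singleton]
  | cons d t ih =>
    by_cases hd : d = c
    · simp only [splitRec, if_pos hd]
      obtain ⟨q, rest, hq⟩ : ∃ q rest, splitRec c t = q :: rest := by
        rcases hsp : splitRec c t with _ | ⟨q, rest⟩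
        · exact absurd hsp (splitRec_ne_nil c t)
        · exact ⟨q, rest, rfl⟩
      rw [hq, PySem.Chars.join_cons_cons, ← hq, ih, hd]
      simp
    · simp only [splitRec, if_neg hd]
      obtain ⟨q, rest, hq⟩ : ∃ q rest, splitRec c t = q :: rest := by
        rcases hsp : splitRec c t with _ | ⟨q, rest⟩
        · exact absurd hsp (splitRec_ne_nil c t)
        · exact ⟨q, rest, rfl⟩
      rw [hq] at ih ⊢
      rcases rest with _ | ⟨r1, rs⟩
      · simp only [List.modifyHead, PySem.Chars.join_singleton] at ih ⊢
        rw [ih]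
      · simp only [List.modifyHead, PySem.Chars.join_cons_cons] at ih ⊢
        simp only [List.cons_append]
        rw [ih]

theorem splitRec_append (c : Char) (a b : List Char) :
    splitRec c (a ++ c :: b) = splitRec c a ++ splitRec c b := by
  induction a with
  | nil => simp [splitRec]
  | cons d a' ih =>
    by_cases hd : d = c
    · simp [splitRec, hd, ih]
    · simp only [List.cons_append, splitRec, if_neg hd, ih]
      obtain ⟨q, rest, hq⟩ : ∃ q rest, splitRec c a' = q :: rest := by
        rcases hsp : splitRec c a' with _ | ⟨q, rest⟩
        · exact absurd hsp (splitRec_ne_nil c a')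
        · exact ⟨q, rest, rfl⟩
      rw [hq]
      simp [List.modifyHead]

theorem splitRec_no (c : Char) (l : List Char) (h : c ∉ l) : splitRec c l = [l] := by
  induction l with
  | nil => rfl
  | cons d t ih =>
    have hd : ¬ d = c := fun hc => h (by simp [hc])
    rw [splitRec, if_neg hd, ih (fun hc => h (List.mem_cons_of_mem d hc))]
    rfl

theorem rpartitionChar_no (c : Char) (y : List Char) (h : c ∉ y) :
    rpartitionChar y c = ([], [], y) := by
  have hdw : y.reverse.dropWhile (· ≠ c) = [] := by
    rw [List.dropWhile_eq_nil_iff]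
    intro x hx
    simp only [ne_eq, decide_eq_true_eq]
    exact fun hc => h (by rw [← hc]; exact (List.mem_reverse).mp hx)
  rw [rpartitionChar, List.span_eq_takeWhile_dropWhile, hdw]

theorem rpartitionChar_mem (c : Char) (y : List Char) (h : c ∈ y) :
    ∃ a b, rpartitionChar y c = (a, [c], b) ∧ y = a ++ c :: b ∧ c ∉ b := by
  obtain ⟨hh, t, hdw⟩ : ∃ hh t, y.reverse.dropWhile (· ≠ c) = hh :: t := by
    rcases hd : y.reverse.dropWhile (· ≠ c) with _ | ⟨hh, t⟩
    · rw [List.dropWhile_eq_nil_iff] at hd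
      have := hd c ((List.mem_reverse).mpr h)
      simp at this
    · exact ⟨hh, t, rfl⟩
  have hhc : hh = c := by
    have := List.head_dropWhile_not (· ≠ c) (l := y.reverse)
    rw [hdw] at this
    simpa using this (by simp)
  rw [hhc] at hdw
  refine ⟨t.reverse, (y.reverse.takeWhile (· ≠ c)).reverse, ?_, ?_, ?_⟩
  · rw [rpartitionChar, List.span_eq_takeWhile_dropWhile, hdw]
  · have := List.takeWhile_append_dropWhile (p := (· ≠ c)) (l := y.reverse)
    rw [hdw] at this
    calc y = y.reverse.reverse := by simp
      _ = (y.reverse.takeWhile (· ≠ c) ++ c :: t).reverse := by rw [this]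
      _ = t.reverse ++ c :: (y.reverse.takeWhile (· ≠ c)).reverse := by simp
  · intro hc
    have := List.mem_takeWhile_imp ((List.mem_reverse).mp hc)
    simp at this

theorem slice_neg_one {α : Type} (xs : List α) :
    PySem.List.slice xs none (some (-1)) = xs.dropLast := by
  simp only [PySem.List.slice, PySem.List.clampIdx, List.dropLast_eq_take]
  norm_num
  split_ifs with h1
  · simp [h1]
  · have : xs.length ≠ 0 := fun h => h1 (List.eq_nil_of_length_eq_zero h)
    omega

theorem strip_eq (y : List Char) :
    (if PySem.List.pyGetD y (-1) ' ' = '/' then y.dropLast else y)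
      = (if y ≠ [] ∧ y.getLast? = some '/' then y.dropLast else y) := by
  rcases y with _ | ⟨c, t⟩
  · simp [PySem.List.pyGetD]
  · have hne : c :: t ≠ [] := by simp
    rw [PySem.List.pyGetD_neg_one _ ' ' hne, List.getLast?_eq_some_getLast (h := hne)]
    by_cases hl : (c :: t).getLast hne = '/'
    · simp [hl, hne]
    · simp [hl, hne]

theorem slash_carpeta (y : List Char) :
    (if PySem.List.len (splitRec '/' y) = 1 then ([] : List Char)
     else PySem.Chars.join ['/'] ((splitRec '/' y).dropLast)) = (rpartitionChar y '/').1 := by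
  by_cases h : '/' ∈ y
  · obtain ⟨a, b, hrp, hy, hnb⟩ := rpartitionChar_mem '/' y h
    rw [hrp, hy, splitRec_append, splitRec_no _ b hnb]
    have hne := splitRec_ne_nil '/' a
    have hlen : ¬ (PySem.List.len (splitRec '/' a ++ [b]) = 1) := by
      simp only [PySem.List.len_eq, List.length_append, List.length_singleton]
      intro hc
      exact hne (List.eq_nil_of_length_eq_zero (by omega))
    rw [if_neg hlen, List.dropLast_concat, join_splitRec]
  · rw [rpartitionChar_no '/' y h, splitRec_no '/' y h]
    simp [PySem.List.len_eq]

theorem slash_nombre (y : List Char) :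
    PySem.List.pyGetD (splitRec '/' y) (-1) [] = (rpartitionChar y '/').2.2 := by
  by_cases h : '/' ∈ y
  · obtain ⟨a, b, hrp, hy, hnb⟩ := rpartitionChar_mem '/' y h
    rw [hrp, hy, splitRec_append, splitRec_no _ b hnb,
      PySem.List.pyGetD_neg_one_append_singleton]
  · rw [rpartitionChar_no '/' y h, splitRec_no '/' y h,
      PySem.List.pyGetD_neg_one _ _ (by simp)]
    simp

theorem dot_pair (m : List Char) :
    (if 1 < PySem.List.len (splitRec '.' m) then
       (PySem.Chars.join ['.'] ((splitRec '.' m).dropLast),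
        PySem.List.pyGetD (splitRec '.' m) (-1) ([] : List Char))
     else (m, ([] : List Char))) =
    (if (rpartitionChar m '.').2.1 ≠ [] then
       ((rpartitionChar m '.').1, (rpartitionChar m '.').2.2)
     else (m, ([] : List Char))) := by
  by_cases h : '.' ∈ m
  · obtain ⟨a, b, hrp, hy, hnb⟩ := rpartitionChar_mem '.' m h
    rw [hrp, hy, splitRec_append, splitRec_no _ b hnb]
    have hne := splitRec_ne_nil '.' a
    have hlen : 1 < PySem.List.len (splitRec '.' a ++ [b]) := by
      simp only [PySem.List.len_eq, List.length_append, List.length_singleton]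
      rcases hsp : splitRec '.' a with _ | ⟨q, rest⟩
      · exact absurd hsp hne
      · simp
    rw [if_pos hlen, if_pos (by simp), List.dropLast_concat, join_splitRec,
      PySem.List.pyGetD_neg_one_append_singleton]
  · rw [rpartitionChar_no '.' m h, splitRec_no '.' m h]
    simp [PySem.List.len_eq]

-- ===== VERDICT (by name: the statement is the Claim_ definition above) =====
theorem informacion_ruta_spec : Claim_equal_informacion_ruta := by
  intro ruta hdom hpre
  unfold Spec_informacion_ruta informacion_ruta informacion_ruta_alt
  simp only [collapseA_eq, foldB_eq, List.nil_append, splitOn_eq, slice_neg_one]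
  rw [strip_eq]
  rw [slash_carpeta, slash_nombre, dot_pair]

theorem informacion_ruta_raises : Claim_raises_informacion_ruta := by
  unfold Claim_raises_informacion_ruta
  exact ⟨fun ruta _ h => by simp [Raises_informacion_ruta] at h; simp [h, Pre_informacion_ruta], by decide⟩

-- deliberate self-check: the raise-witness value of B stated by informacion_ruta_raises computes
theorem informacion_ruta_raises_witness_ok :
    informacion_ruta_alt pvRaiseWitness_informacion_ruta = pvRaiseWitnessOut_informacion_ruta := by
  have h := informacion_ruta_raises
  unfold Claim_raises_informacion_ruta at h
  exact h.2.2.2
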